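-- pv_equiv track=rewrite | github.com/grimeguardians/grime-guardians-hq | src/tools/message_classification_tools.py | _extract_issue_details
-- ===== SOURCE A (Python) =====
-- from typing import Dict, List, Any, Optional
--
-- def _extract_issue_details(message: str) -> Dict[str, Any]:
--     """Extract issue details from customer experience messages."""
--     details = {}
--
--     # Determine issue type
--     if any(word in message for word in ["quality", "clean", "dirty", "missed"]):
--         details["issue_type"] = "service_quality"
--     elif any(word in message for word in ["schedule", "time", "late", "early"]):
--         details["issue_type"] = "scheduling"
--     elif any(word in message for word in ["billing", "charge", "payment", "cost"]):
--         details["issue_type"] = "billing"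
--     elif any(word in message for word in ["staff", "team", "rude", "unprofessional"]):
--         details["issue_type"] = "staff_behavior"
--     else:
--         details["issue_type"] = "general"
--
--     # Determine severity
--     if any(word in message for word in ["terrible", "awful", "worst", "horrible"]):
--         details["severity"] = "high"
--     elif any(word in message for word in ["disappointing", "poor", "bad"]):
--         details["severity"] = "medium"
--     else:
--         details["severity"] = "low"
--
--     return details
-- ===== SOURCE B (Python) =====
-- # Flat keyword table with priority ranks: one pass over all keywords computing
-- # the minimal (best) rank per field, then index into label lists.
-- KEYWORDS = [
--     ("quality", "issue_type", 0), ("clean", "issue_type", 0),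
--     ("dirty", "issue_type", 0), ("missed", "issue_type", 0),
--     ("schedule", "issue_type", 1), ("time", "issue_type", 1),
--     ("late", "issue_type", 1), ("early", "issue_type", 1),
--     ("billing", "issue_type", 2), ("charge", "issue_type", 2),
--     ("payment", "issue_type", 2), ("cost", "issue_type", 2),
--     ("staff", "issue_type", 3), ("team", "issue_type", 3),
--     ("rude", "issue_type", 3), ("unprofessional", "issue_type", 3),
--     ("terrible", "severity", 0), ("awful", "severity", 0),
--     ("worst", "severity", 0), ("horrible", "severity", 0),
--     ("disappointing", "severity", 1), ("poor", "severity", 1),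
--     ("bad", "severity", 1),
-- ]
-- ISSUE_LABELS = ["service_quality", "scheduling", "billing", "staff_behavior", "general"]
-- SEVERITY_LABELS = ["high", "medium", "low"]
--
--
-- def _extract_issue_details(message: str) -> dict:
--     """Extract issue details: argmin of keyword priority ranks over one flat scan."""
--     best_issue = 4  # default -> "general"
--     best_sev = 2    # default -> "low"
--     for word, field, rank in KEYWORDS:
--         if word in message:
--             if field == "issue_type":
--                 if rank < best_issue:
--                     best_issue = rank
--             else:
--                 if rank < best_sev:
--                     best_sev = rank
--     return {"issue_type": ISSUE_LABELS[best_issue],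
--             "severity": SEVERITY_LABELS[best_sev]}
-- ===== Notes on version B (the rewrite author's own statement) =====
-- stated objective: alternative
-- what changed: Replaced the two if/elif first-match cascades by a single flat keyword table (keyword, field, priority rank) scanned once while keeping the minimal matched rank per field, the result being looked up in label lists; equal because rank order mirrors branch order so the minimal matched rank is exactly the first matching branch.
import Mathlib
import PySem

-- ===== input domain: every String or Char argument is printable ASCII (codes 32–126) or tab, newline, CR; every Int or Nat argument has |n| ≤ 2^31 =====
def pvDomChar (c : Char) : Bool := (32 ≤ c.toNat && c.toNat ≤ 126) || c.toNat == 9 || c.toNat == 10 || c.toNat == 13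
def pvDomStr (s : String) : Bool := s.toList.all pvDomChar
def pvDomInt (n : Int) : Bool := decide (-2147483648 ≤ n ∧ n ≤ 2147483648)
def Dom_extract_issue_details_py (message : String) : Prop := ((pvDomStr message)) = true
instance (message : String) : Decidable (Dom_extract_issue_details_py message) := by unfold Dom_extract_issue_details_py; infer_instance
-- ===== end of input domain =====

-- B replaces A's two if/elif keyword cascades by one pass over a flat (keyword, field,
-- priority-rank) table keeping the minimal matched rank per field (objective: alternative).

-- ===== PORT A =====
-- nested if/elif cascade, dict built by two insertions (insertion order preserved)
def extract_issue_details_py (message : String) : List (String × String) :=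
  let details : PySem.Dict String String := PySem.Dict.empty
  let details :=
    if ["quality", "clean", "dirty", "missed"].any (fun w => PySem.Str.isIn w message) then
      PySem.Dict.insert details "issue_type" "service_quality"
    else if ["schedule", "time", "late", "early"].any (fun w => PySem.Str.isIn w message) then
      PySem.Dict.insert details "issue_type" "scheduling"
    else if ["billing", "charge", "payment", "cost"].any (fun w => PySem.Str.isIn w message) then
      PySem.Dict.insert details "issue_type" "billing"
    else if ["staff", "team", "rude", "unprofessional"].any (fun w => PySem.Str.isIn w message) then
      PySem.Dict.insert details "issue_type" "staff_behavior"
    else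
      PySem.Dict.insert details "issue_type" "general"
  let details :=
    if ["terrible", "awful", "worst", "horrible"].any (fun w => PySem.Str.isIn w message) then
      PySem.Dict.insert details "severity" "high"
    else if ["disappointing", "poor", "bad"].any (fun w => PySem.Str.isIn w message) then
      PySem.Dict.insert details "severity" "medium"
    else
      PySem.Dict.insert details "severity" "low"
  details.items

-- ===== PORT B =====
-- Source B's module-level flat keyword table: (keyword, field, priority rank)
def pvKeywords : List (String × String × Nat) :=
  [("quality", "issue_type", 0), ("clean", "issue_type", 0),
   ("dirty", "issue_type", 0), ("missed", "issue_type", 0),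
   ("schedule", "issue_type", 1), ("time", "issue_type", 1),
   ("late", "issue_type", 1), ("early", "issue_type", 1),
   ("billing", "issue_type", 2), ("charge", "issue_type", 2),
   ("payment", "issue_type", 2), ("cost", "issue_type", 2),
   ("staff", "issue_type", 3), ("team", "issue_type", 3),
   ("rude", "issue_type", 3), ("unprofessional", "issue_type", 3),
   ("terrible", "severity", 0), ("awful", "severity", 0),
   ("worst", "severity", 0), ("horrible", "severity", 0),
   ("disappointing", "severity", 1), ("poor", "severity", 1),
   ("bad", "severity", 1)]

def pvIssueLabels : List String :=
  ["service_quality", "scheduling", "billing", "staff_behavior", "general"]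
def pvSeverityLabels : List String := ["high", "medium", "low"]

-- loop body of Source B's single for-loop: state = (best_issue, best_sev)
def pvStep (message : String) (acc : Nat × Nat) (e : String × String × Nat) : Nat × Nat :=
  if PySem.Str.isIn e.1 message then
    if e.2.1 == "issue_type" then
      (if e.2.2 < acc.1 then (e.2.2, acc.2) else acc)
    else
      (if e.2.2 < acc.2 then (acc.1, e.2.2) else acc)
  else acc

def extract_issue_details_py_alt (message : String) : List (String × String) :=
  let best := pvKeywords.foldl (pvStep message) (4, 2)
  -- label-list indexing: the ranks are always in range, so getD is exact here
  [("issue_type", pvIssueLabels.getD best.1 "general"),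
   ("severity", pvSeverityLabels.getD best.2 "low")]

-- ===== PRECONDITION & SPEC =====
def Spec_extract_issue_details_py (message : String) (out : List (String × String)) : Prop := out = extract_issue_details_py_alt message
instance (message : String) (out : List (String × String)) : Decidable (Spec_extract_issue_details_py message out) := by unfold Spec_extract_issue_details_py; infer_instance

-- ===== CLAIM (what is proved, stated in full; the proofs are below) =====
def Claim_equal_extract_issue_details_py : Prop := ∀ (message : String), Dom_extract_issue_details_py message → Spec_extract_issue_details_py message (extract_issue_details_py message)

-- ===== LEMMAS AND PROOFS =====

-- updating twice with the same (field, rank) is the same as updating once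
def pvUpd (acc : Nat × Nat) (f : String) (r : Nat) : Nat × Nat :=
  if f == "issue_type" then (if r < acc.1 then (r, acc.2) else acc)
  else (if r < acc.2 then (acc.1, r) else acc)

lemma pvStep_eq (message : String) (acc : Nat × Nat) (e : String × String × Nat) :
    pvStep message acc e = if PySem.Str.isIn e.1 message then pvUpd acc e.2.1 e.2.2 else acc := by
  simp [pvStep, pvUpd]

lemma pvUpd_idem (acc : Nat × Nat) (f : String) (r : Nat) :
    pvUpd (pvUpd acc f r) f r = pvUpd acc f r := by
  unfold pvUpd; split_ifs <;> simp_all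

-- folding the loop body over a group of keywords sharing one (field, rank) tag
lemma pvFold_group (message : String) (f : String) (r : Nat) (words : List String)
    (acc : Nat × Nat) :
    List.foldl (pvStep message) acc (words.map (fun w => (w, f, r)))
      = if words.any (fun w => PySem.Str.isIn w message) then pvUpd acc f r else acc := by
  induction words generalizing acc with
  | nil => simp
  | cons w ws ih =>
    simp only [List.map_cons, List.foldl_cons, List.any_cons, pvStep_eq, ih]
    by_cases h : PySem.Str.isIn w message = true <;>
      simp only [h, if_true, Bool.true_or, Bool.false_or] <;>
      split_ifs <;> first | rfl | (exact pvUpd_idem ..) | simp_all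

lemma pvKeywords_groups :
    pvKeywords =
      (["quality", "clean", "dirty", "missed"].map (fun w => (w, "issue_type", 0)))
      ++ (["schedule", "time", "late", "early"].map (fun w => (w, "issue_type", 1)))
      ++ (["billing", "charge", "payment", "cost"].map (fun w => (w, "issue_type", 2)))
      ++ (["staff", "team", "rude", "unprofessional"].map (fun w => (w, "issue_type", 3)))
      ++ (["terrible", "awful", "worst", "horrible"].map (fun w => (w, "severity", 0)))
      ++ (["disappointing", "poor", "bad"].map (fun w => (w, "severity", 1))) := rfl

-- ===== VERDICT (by name: the statement is the Claim_ definition above) =====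
theorem extract_issue_details_py_spec : Claim_equal_extract_issue_details_py := by
  intro message _
  unfold Spec_extract_issue_details_py extract_issue_details_py extract_issue_details_py_alt
  rw [pvKeywords_groups]
  simp only [List.foldl_append, pvFold_group]
  split_ifs <;> rfl
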